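-- pv_equiv track=rewrite | github.com/nitekat1124/advent-of-code-2021 | solutions/day17.py | get_possible_velocity_x_count
-- ===== SOURCE A (Python) =====
-- def get_possible_velocity_x_count(range_x, times):
--     if len(times) < 1:
--         return 0
--     ret = 0
--     for start_velocity in range(1, range_x[1] + 1):
--         count = 0
--         pos = 0
--         curr_velocity = start_velocity
--         for t in range(1, max(times) + 1):
--             pos += curr_velocity
--             if range_x[0] <= pos <= range_x[1] and (t in times):
--                 count += 1
--                 break
--             curr_velocity = max(0, curr_velocity - 1)
--         ret += count
--     return ret
-- ===== SOURCE B (Python) =====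
-- def get_possible_velocity_x_count(range_x, times):
--     if len(times) < 1:
--         return 0
--     lo, hi = range_x[0], range_x[1]
--
--     def pos_x(v, t):
--         # closed form: position after t steps starting with x-velocity v (drag, floored at 0)
--         return v * t - t * (t - 1) // 2 if t <= v else v * (v + 1) // 2
--
--     def hits(v):
--         return any(t >= 1 and lo <= pos_x(v, t) <= hi for t in times)
--
--     return sum(1 if hits(v) else 0 for v in range(1, hi + 1))
-- ===== Notes on version B (the rewrite author's own statement) =====
-- stated objective: faster
-- what changed: Replaces A's step-by-step per-velocity simulation over every time 1..max(times) with a closed-form position formula evaluated only at the listed times.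
import Mathlib
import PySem

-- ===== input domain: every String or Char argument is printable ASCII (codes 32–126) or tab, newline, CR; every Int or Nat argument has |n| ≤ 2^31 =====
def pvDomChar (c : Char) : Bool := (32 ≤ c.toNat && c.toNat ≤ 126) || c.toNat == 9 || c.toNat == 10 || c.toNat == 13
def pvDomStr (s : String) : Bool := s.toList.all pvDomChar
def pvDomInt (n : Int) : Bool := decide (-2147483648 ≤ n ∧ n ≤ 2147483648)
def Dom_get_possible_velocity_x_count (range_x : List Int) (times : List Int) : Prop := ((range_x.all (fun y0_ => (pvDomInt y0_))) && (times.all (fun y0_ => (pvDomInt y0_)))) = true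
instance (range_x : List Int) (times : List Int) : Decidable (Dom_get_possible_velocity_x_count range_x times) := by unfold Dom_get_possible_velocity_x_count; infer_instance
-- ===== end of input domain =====

-- B replaces A's step-by-step per-velocity simulation over all times 1..max(times)
-- by a closed-form position formula evaluated only at the listed times (faster).


-- ===== PORT A =====
-- one inner-loop step of A; state = (count, pos, curr_velocity, broken-out-of-loop)
def pvStepA (lo hi : Int) (times : List Int) (st : Int × Int × Int × Bool) (t : Int) : Int × Int × Int × Bool :=
  if st.2.2.2 then st
  else
    let pos := st.2.1 + st.2.2.1
    if lo ≤ pos ∧ pos ≤ hi ∧ times.contains t then (st.1 + 1, pos, st.2.2.1, true)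
    else (st.1, pos, max 0 (st.2.2.1 - 1), false)

def get_possible_velocity_x_count (range_x : List Int) (times : List Int) : Int :=
  if times.length < 1 then 0
  else
    (PySem.List.pyRange 1 ((PySem.List.pyGet? range_x 1).getD 0 + 1) 1).foldl
      (fun ret v =>
        ret + ((PySem.List.pyRange 1 (((PySem.List.max? times (fun y => y)).getD 0) + 1) 1).foldl
                 (pvStepA ((PySem.List.pyGet? range_x 0).getD 0) ((PySem.List.pyGet? range_x 1).getD 0) times)
                 (0, 0, v, false)).1)
      0

-- ===== PORT B =====
-- closed form: x-position after t steps starting with velocity v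
def pvPosX (v t : Int) : Int :=
  if t ≤ v then v * t - PySem.Int.floordiv (t * (t - 1)) 2
  else PySem.Int.floordiv (v * (v + 1)) 2

def pvHits (lo hi : Int) (times : List Int) (v : Int) : Bool :=
  times.any (fun t => decide (1 ≤ t) && (decide (lo ≤ pvPosX v t) && decide (pvPosX v t ≤ hi)))

def get_possible_velocity_x_count_alt (range_x : List Int) (times : List Int) : Int :=
  if times.length < 1 then 0
  else
    ((PySem.List.pyRange 1 ((PySem.List.pyGet? range_x 1).getD 0 + 1) 1).map
      (fun v => if pvHits ((PySem.List.pyGet? range_x 0).getD 0) ((PySem.List.pyGet? range_x 1).getD 0) times v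
                then (1 : Int) else 0)).sum

-- ===== PRECONDITION & SPEC =====
-- Pre_ excludes exactly the inputs where the Python A raises IndexError:
-- a nonempty times together with a range_x of fewer than 2 elements.
def Pre_get_possible_velocity_x_count (range_x : List Int) (times : List Int) : Prop :=
  times = [] ∨ 2 ≤ range_x.length
instance (range_x : List Int) (times : List Int) : Decidable (Pre_get_possible_velocity_x_count range_x times) := by unfold Pre_get_possible_velocity_x_count; infer_instance

def pvWitness_get_possible_velocity_x_count : List Int × List Int := ([7, 10], [2, 3])

def Spec_get_possible_velocity_x_count (range_x : List Int) (times : List Int) (out : Int) : Prop := out = get_possible_velocity_x_count_alt range_x times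
instance (range_x : List Int) (times : List Int) (out : Int) : Decidable (Spec_get_possible_velocity_x_count range_x times out) := by unfold Spec_get_possible_velocity_x_count; infer_instance

-- ===== CLAIM (what is proved, stated in full; the proofs are below) =====
def Claim_equal_get_possible_velocity_x_count : Prop := ∀ (range_x : List Int) (times : List Int), Dom_get_possible_velocity_x_count range_x times → Pre_get_possible_velocity_x_count range_x times → Spec_get_possible_velocity_x_count range_x times (get_possible_velocity_x_count range_x times)

-- ===== LEMMAS AND PROOFS =====

-- closed-form recurrence for the simulated position
lemma pvPosX_succ (v k : Int) : pvPosX v (k + 1) = pvPosX v k + max 0 (v - k) := by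
  unfold pvPosX
  simp only [PySem.Int.floordiv_eq_ediv_of_pos (show (0:Int) < 2 by norm_num)]
  have e1 : ((k + 1) * (k + 1 - 1)) = k * k + k := by ring
  have e2 : (k * (k - 1)) = k * k - k := by ring
  have e3 : (v * (v + 1)) = v * v + v := by ring
  rw [e1, e2, e3]
  obtain ⟨m1, hm1⟩ : (2:Int) ∣ k * k + k := by
    rcases Int.even_mul_succ_self k with ⟨m, hm⟩
    exact ⟨m, by nlinarith⟩
  obtain ⟨m2, hm2⟩ : (2:Int) ∣ k * k - k := by
    rcases Int.even_mul_succ_self (k - 1) with ⟨m, hm⟩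
    exact ⟨m, by nlinarith⟩
  obtain ⟨m3, hm3⟩ : (2:Int) ∣ v * v + v := by
    rcases Int.even_mul_succ_self v with ⟨m, hm⟩
    exact ⟨m, by nlinarith⟩
  rw [hm1, hm2, hm3]
  rw [Int.mul_ediv_cancel_left m1 (by norm_num), Int.mul_ediv_cancel_left m2 (by norm_num),
      Int.mul_ediv_cancel_left m3 (by norm_num)]
  have hvk : v * (k + 1) = v * k + v := by ring
  split_ifs with h1 h2 h2
  · rw [hvk]
    have hmax : max 0 (v - k) = v - k := by omega
    rw [hmax]; linarith
  · omega
  · -- k ≤ v but ¬ k + 1 ≤ v, hence v = k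
    have hvk2 : v = k := by omega
    subst hvk2
    have hmax : max 0 (v - v) = 0 := by omega
    rw [hmax]; linarith
  · have hmax : max 0 (v - k) = 0 := by omega
    rw [hmax]; linarith

def pvCondA (lo hi : Int) (times : List Int) (v t : Int) : Bool :=
  decide (lo ≤ pvPosX v t) && (decide (pvPosX v t ≤ hi) && times.contains t)

-- invariant of A's inner simulation loop
lemma pvStepA_broken (lo hi : Int) (times : List Int) (st : Int × Int × Int × Bool) (t : Int)
    (h : st.2.2.2 = true) : pvStepA lo hi times st t = st := by
  unfold pvStepA; rw [if_pos h]

lemma pvStepA_live (lo hi : Int) (times : List Int) (c p w t : Int) :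
    pvStepA lo hi times (c, p, w, false) t
      = if lo ≤ p + w ∧ p + w ≤ hi ∧ times.contains t then (c + 1, p + w, w, true)
        else (c, p + w, max 0 (w - 1), false) := by
  unfold pvStepA; simp

lemma pvSimA (lo hi v : Int) (times : List Int) (hv : 0 ≤ v) : ∀ (n : Nat),
    (if ((PySem.List.pyRange 1 ((n : Int) + 1) 1).any (pvCondA lo hi times v))
     then ((PySem.List.pyRange 1 ((n : Int) + 1) 1).foldl (pvStepA lo hi times) (0, 0, v, false)).1 = 1 ∧
          ((PySem.List.pyRange 1 ((n : Int) + 1) 1).foldl (pvStepA lo hi times) (0, 0, v, false)).2.2.2 = true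
     else (PySem.List.pyRange 1 ((n : Int) + 1) 1).foldl (pvStepA lo hi times) (0, 0, v, false)
          = (0, pvPosX v (n : Int), max 0 (v - (n : Int)), false)) := by
  intro n
  induction n with
  | zero =>
    rw [PySem.List.pyRange_one_eq_nil (by norm_num)]
    simp only [List.any_nil, List.foldl_nil]
    rw [if_neg (by simp)]
    have h0 : pvPosX v 0 = 0 := by
      unfold pvPosX
      rw [if_pos (by exact_mod_cast hv)]
      norm_num [PySem.Int.floordiv]
    simp [h0]
    omega
  | succ n ih =>
    have hsplit : PySem.List.pyRange 1 (((n : Nat) + 1 : Int) + 1) 1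
        = PySem.List.pyRange 1 ((n : Int) + 1) 1 ++ [((n : Int) + 1)] := by
      have h := PySem.List.pyRange_one_succ_right (a := 1) (b := (n : Int) + 1) (by omega)
      push_cast
      exact h
    push_cast
    rw [hsplit, List.any_append, List.foldl_append]
    by_cases hAny : (PySem.List.pyRange 1 ((n : Int) + 1) 1).any (pvCondA lo hi times v) = true
    · rw [if_pos hAny] at ih
      rw [if_pos (by simp [hAny])]
      simp only [List.foldl_cons, List.foldl_nil]
      rw [pvStepA_broken lo hi times _ _ ih.2]
      exact ih
    · rw [if_neg hAny] at ih
      simp only [Bool.not_eq_true] at hAny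
      rw [ih]
      simp only [List.foldl_cons, List.foldl_nil]
      rw [pvStepA_live]
      have hpos : pvPosX v (n : Int) + max 0 (v - (n : Int)) = pvPosX v ((n : Int) + 1) :=
        (pvPosX_succ v (n : Int)).symm
      rw [hpos]
      by_cases hc : pvCondA lo hi times v ((n : Int) + 1) = true
      · have hparts := hc
        unfold pvCondA at hparts
        simp only [Bool.and_eq_true, decide_eq_true_eq] at hparts
        have hcnd : lo ≤ pvPosX v ((n : Int) + 1) ∧ pvPosX v ((n : Int) + 1) ≤ hi ∧
            times.contains ((n : Int) + 1) = true := ⟨hparts.1, hparts.2.1, hparts.2.2⟩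
        rw [if_pos hcnd]
        rw [if_pos (by simp [hc])]
        exact ⟨by norm_num, rfl⟩
      · have hcf : pvCondA lo hi times v ((n : Int) + 1) = false := by
          cases hb : pvCondA lo hi times v ((n : Int) + 1)
          · rfl
          · exact absurd hb hc
        have hncnd : ¬(lo ≤ pvPosX v ((n : Int) + 1) ∧ pvPosX v ((n : Int) + 1) ≤ hi ∧
            times.contains ((n : Int) + 1) = true) := by
          intro hx
          apply hc
          unfold pvCondA
          simp only [Bool.and_eq_true, decide_eq_true_eq]
          exact ⟨hx.1, hx.2.1, hx.2.2⟩
        rw [if_neg hncnd]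
        rw [if_neg (by simp [hAny, hcf])]
        have hmax2 : max 0 (max 0 (v - (n : Int)) - 1) = max 0 (v - ((n : Int) + 1)) := by omega
        rw [hmax2]

-- A's inner-loop count equals B's closed-form hit test, for T an upper bound of times
lemma pvInner (lo hi v T : Int) (times : List Int) (hv : 0 ≤ v)
    (hT : ∀ t ∈ times, t ≤ T) :
    ((PySem.List.pyRange 1 (T + 1) 1).foldl (pvStepA lo hi times) (0, 0, v, false)).1
      = if pvHits lo hi times v then 1 else 0 := by
  -- replace T by its toNat (the range is empty in either reading when T < 0)
  have hrange : PySem.List.pyRange 1 (T + 1) 1 = PySem.List.pyRange 1 ((T.toNat : Int) + 1) 1 := by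
    by_cases h : 0 ≤ T
    · rw [Int.toNat_of_nonneg h]
    · rw [PySem.List.pyRange_one_eq_nil (by omega), PySem.List.pyRange_one_eq_nil (by omega)]
  rw [hrange]
  have hsim := pvSimA lo hi v times hv T.toNat
  have hiff : ((PySem.List.pyRange 1 ((T.toNat : Int) + 1) 1).any (pvCondA lo hi times v) = true)
      ↔ (pvHits lo hi times v = true) := by
    unfold pvHits
    rw [List.any_eq_true, List.any_eq_true]
    constructor
    · rintro ⟨t, htr, hcond⟩
      unfold pvCondA at hcond
      simp only [Bool.and_eq_true, decide_eq_true_eq] at hcond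
      have h1t := PySem.List.mem_pyRange_one.1 htr
      refine ⟨t, by simpa using hcond.2.2, ?_⟩
      simp only [Bool.and_eq_true, decide_eq_true_eq]
      exact ⟨h1t.1, hcond.1, hcond.2.1⟩
    · rintro ⟨t, htm, hcond⟩
      simp only [Bool.and_eq_true, decide_eq_true_eq] at hcond
      refine ⟨t, ?_, ?_⟩
      · rw [PySem.List.mem_pyRange_one]
        have hub := hT t htm
        have h0T : 0 ≤ T := le_trans (by omega) hub
        rw [Int.toNat_of_nonneg h0T]
        exact ⟨hcond.1, by omega⟩
      · unfold pvCondA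
        simp only [Bool.and_eq_true, decide_eq_true_eq]
        exact ⟨hcond.2.1, hcond.2.2, by simpa using htm⟩
  have hany : (PySem.List.pyRange 1 ((T.toNat : Int) + 1) 1).any (pvCondA lo hi times v)
      = pvHits lo hi times v := by
    cases hA : (PySem.List.pyRange 1 ((T.toNat : Int) + 1) 1).any (pvCondA lo hi times v)
    · cases hB : pvHits lo hi times v
      · rfl
      · exact absurd (hiff.mpr hB) (by rw [hA]; exact Bool.false_ne_true)
    · exact (hiff.mp hA).symm
  rw [hany] at hsim
  by_cases hb : pvHits lo hi times v = true
  · rw [if_pos hb] at hsim ⊢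
    exact hsim.1
  · rw [if_neg hb] at hsim ⊢
    rw [hsim]

-- generic: a running-sum fold is the sum of the mapped list
lemma pvFoldlSum (g : Int → Int) : ∀ (l : List Int) (a : Int),
    l.foldl (fun acc x => acc + g x) a = a + (l.map g).sum := by
  intro l
  induction l with
  | nil => intro a; simp
  | cons x t ih =>
    intro a
    simp only [List.foldl_cons, List.map_cons, List.sum_cons]
    rw [ih]
    ring

-- max(times) bounds every element of a nonempty times
lemma pvMaxUB (times : List Int) (h : times ≠ []) :
    ∀ t ∈ times, t ≤ (PySem.List.max? times (fun y => y)).getD 0 := by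
  intro t ht
  cases hmx : PySem.List.max? times (fun y => y) with
  | none =>
    cases times with
    | nil => exact absurd rfl h
    | cons a l =>
      rw [PySem.List.max?_id_cons] at hmx
      cases hmx
  | some m =>
    have := PySem.List.max?_isMax hmx t ht
    simp only [Option.getD_some]
    simpa using this

-- ===== VERDICT (by name: the statement is the Claim_ definition above) =====
theorem get_possible_velocity_x_count_spec : Claim_equal_get_possible_velocity_x_count := by
  intro range_x times _ _
  unfold Spec_get_possible_velocity_x_count
  unfold get_possible_velocity_x_count get_possible_velocity_x_count_alt
  by_cases hlen : times.length < 1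
  · rw [if_pos hlen, if_pos hlen]
  · rw [if_neg hlen, if_neg hlen]
    have hne : times ≠ [] := by
      intro h
      exact hlen (by simp [h])
    have hfold := pvFoldlSum
      (fun v => ((PySem.List.pyRange 1 (((PySem.List.max? times (fun y => y)).getD 0) + 1) 1).foldl
                 (pvStepA ((PySem.List.pyGet? range_x 0).getD 0) ((PySem.List.pyGet? range_x 1).getD 0) times)
                 (0, 0, v, false)).1)
      (PySem.List.pyRange 1 ((PySem.List.pyGet? range_x 1).getD 0 + 1) 1) 0
    beta_reduce at hfold
    rw [hfold, zero_add]
    congr 1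
    apply List.map_congr_left
    intro v hvmem
    have hv : 0 ≤ v := by
      have := (PySem.List.mem_pyRange_one).1 hvmem
      omega
    exact pvInner _ _ v _ times hv (pvMaxUB times hne)
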